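-- pv_equiv track=rewrite | github.com/AnnaMihailovna/exercises_python | get_nearest_zero_2.py | get_nearest_zero
-- ===== SOURCE A (Python) =====
-- from typing import List, Tuple
--
-- def get_nearest_zero(length: int, numbers_houses: List[int]) -> List[int]:
-- 	distance = [0] * len(numbers_houses)
-- 	index_zero = None
-- 	for i, value in enumerate(numbers_houses):
-- 		if value == 0:
-- 			index_zero = i
-- 			continue
-- 		if index_zero is not None:
-- 			distance[i] = i - index_zero
-- 		else:
-- 			distance[i] = length
-- 	index_zero = None
-- 	for i, value in reversed(list(enumerate(numbers_houses))):
-- 		if value == 0: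
-- 			index_zero = i
-- 			continue
-- 		if (index_zero != None and
--             distance[i] > index_zero - i):
-- 			distance[i] = index_zero - i
-- 	return distance
-- ===== SOURCE B (Python) =====
-- from typing import List
--
--
-- def get_nearest_zero(length: int, numbers_houses: List[int]) -> List[int]:
--     # One pass with a moving pointer into the sorted list of zero positions,
--     # instead of two directional sweeps over a mutable distance array.
--     zeros = [i for i, v in enumerate(numbers_houses) if v == 0]
--     res = []
--     k = 0
--     for i, v in enumerate(numbers_houses):
--         if v == 0:
--             res.append(0)
--             continue
--         while k < len(zeros) and zeros[k] < i:
--             k += 1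
--         d = length if k == 0 else i - zeros[k - 1]
--         if k < len(zeros):
--             d = min(d, zeros[k] - i)
--         res.append(d)
--     return res
-- ===== Notes on version B (the rewrite author's own statement) =====
-- stated objective: alternative
-- what changed: Replaces A's two directional sweeps over a mutable distance array by a single pass that first collects the sorted list of zero positions and then, with a monotone pointer into that list (merged two-pointer bisect), takes the minimum of the distances to the nearest zero on the left (or the `length` sentinel when none) and on the right.
import Mathlib
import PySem

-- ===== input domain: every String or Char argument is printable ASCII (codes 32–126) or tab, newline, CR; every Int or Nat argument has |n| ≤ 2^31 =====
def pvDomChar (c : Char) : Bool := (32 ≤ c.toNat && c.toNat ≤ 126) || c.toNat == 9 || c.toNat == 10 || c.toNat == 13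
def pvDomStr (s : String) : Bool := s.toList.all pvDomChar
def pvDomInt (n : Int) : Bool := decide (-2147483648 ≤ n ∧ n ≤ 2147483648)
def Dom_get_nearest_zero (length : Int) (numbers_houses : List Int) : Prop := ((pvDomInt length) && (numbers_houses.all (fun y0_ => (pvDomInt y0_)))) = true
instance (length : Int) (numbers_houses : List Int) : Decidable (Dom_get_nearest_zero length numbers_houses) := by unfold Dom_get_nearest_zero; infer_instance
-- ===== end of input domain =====

-- B replaces A's two directional sweeps over a mutable array by one pass over a
-- precomputed sorted list of zero positions with a monotone pointer (alternative, same cost).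


-- ===== PORT A =====
-- enumerate(xs) starting at s; Python's indices are the nonnegative ints 0,1,2,…, kept as Nat here
def pvEnum (s : Nat) : List Int → List (Nat × Int)
  | [] => []
  | v :: rest => (s, v) :: pvEnum (s + 1) rest

-- A's first loop: distance[i] := i - index_zero (or length), index_zero updated at zeros
def azFwd (length : Int) : List (Nat × Int) → List Int → Option Nat → List Int
  | [], d, _ => d
  | (i, v) :: rest, d, iz =>
    if v = 0 then azFwd length rest d (some i)
    else
      match iz with
      | some z => azFwd length rest (d.set i ((i : Int) - (z : Int))) iz
      | none => azFwd length rest (d.set i length) iz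

-- A's second loop over reversed(list(enumerate(...)))
def azBwd : List (Nat × Int) → List Int → Option Nat → List Int
  | [], d, _ => d
  | (i, v) :: rest, d, iz =>
    if v = 0 then azBwd rest d (some i)
    else
      match iz with
      | some z =>
        if d.getD i 0 > (z : Int) - (i : Int) then azBwd rest (d.set i ((z : Int) - (i : Int))) iz
        else azBwd rest d iz
      | none => azBwd rest d iz

def get_nearest_zero (length : Int) (numbers_houses : List Int) : List Int :=
  azBwd ((pvEnum 0 numbers_houses).reverse)
    (azFwd length (pvEnum 0 numbers_houses) (List.replicate numbers_houses.length 0) none)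
    none

-- ===== PORT B =====
-- zeros = [i for i, v in enumerate(xs) if v == 0]
def bzZeros (s : Nat) : List Int → List Nat
  | [] => []
  | v :: rest => if v = 0 then s :: bzZeros (s + 1) rest else bzZeros (s + 1) rest

-- while k < len(zeros) and zeros[k] < i: k += 1
def bzAdvance (zeros : List Nat) (i : Nat) (k : Nat) : Nat :=
  if h : k < zeros.length then
    if zeros.getD k 0 < i then bzAdvance zeros i (k + 1) else k
  else k
termination_by zeros.length - k
decreasing_by omega

-- B's single pass building res front-to-back with the moving pointer k
def bzGo (length : Int) (zeros : List Nat) : List (Nat × Int) → Nat → List Int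
  | [], _ => []
  | (i, v) :: rest, k =>
    if v = 0 then 0 :: bzGo length zeros rest k
    else
      let k' := bzAdvance zeros i k
      let d0 : Int := if k' = 0 then length else (i : Int) - ((zeros.getD (k' - 1) 0 : Nat) : Int)
      let d : Int :=
        if k' < zeros.length then min d0 (((zeros.getD k' 0 : Nat) : Int) - (i : Int)) else d0
      d :: bzGo length zeros rest k'

def get_nearest_zero_alt (length : Int) (numbers_houses : List Int) : List Int :=
  bzGo length (bzZeros 0 numbers_houses) (pvEnum 0 numbers_houses) 0

-- ===== PRECONDITION & SPEC =====
def Spec_get_nearest_zero (length : Int) (numbers_houses : List Int) (out : List Int) : Prop := out = get_nearest_zero_alt length numbers_houses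
instance (length : Int) (numbers_houses : List Int) (out : List Int) : Decidable (Spec_get_nearest_zero length numbers_houses out) := by unfold Spec_get_nearest_zero; infer_instance

-- ===== CLAIM (what is proved, stated in full; the proofs are below) =====
def Claim_equal_get_nearest_zero : Prop := ∀ (length : Int) (numbers_houses : List Int), Dom_get_nearest_zero length numbers_houses → Spec_get_nearest_zero length numbers_houses (get_nearest_zero length numbers_houses)

-- ===== LEMMAS AND PROOFS =====

-- scanning accumulator shared by both of A's loops: last-written zero index
def lzF (iz : Option Nat) (l : List (Nat × Int)) : Option Nat :=
  l.foldl (fun a p => if p.2 = 0 then some p.1 else a) iz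

-- the per-index value B computes, expressed through the zero-position list
def bVal (length : Int) (Z : List Nat) (j : Nat) : Int :=
  let c := Z.countP (fun z => decide (z < j))
  let d0 : Int := if c = 0 then length else (j : Int) - ((Z.getD (c - 1) 0 : Nat) : Int)
  if c < Z.length then min d0 (((Z.getD c 0 : Nat) : Int) - (j : Int)) else d0

theorem pvEnum_append (s : Nat) (xs ys : List Int) :
    pvEnum s (xs ++ ys) = pvEnum s xs ++ pvEnum (s + xs.length) ys := by
  induction xs generalizing s with
  | nil => simp [pvEnum]
  | cons v rest ih => simp [pvEnum, ih, Nat.add_assoc, Nat.add_comm 1 rest.length]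

theorem pvEnum_getElem? (s : Nat) (xs : List Int) (j : Nat) :
    (pvEnum s xs)[j]? = xs[j]?.map (fun v => (s + j, v)) := by
  induction xs generalizing s j with
  | nil => simp [pvEnum]
  | cons v rest ih =>
    cases j with
    | zero => simp [pvEnum]
    | succ j => simp [pvEnum, ih, Nat.add_assoc, Nat.add_comm 1 j]

theorem pvEnum_length (s : Nat) (xs : List Int) : (pvEnum s xs).length = xs.length := by
  induction xs generalizing s with
  | nil => rfl
  | cons v rest ih => simp [pvEnum, ih]

theorem azFwd_length (length : Int) (l : List (Nat × Int)) (d : List Int) (iz : Option Nat) :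
    (azFwd length l d iz).length = d.length := by
  induction l generalizing d iz with
  | nil => rfl
  | cons p rest ih =>
    obtain ⟨i, v⟩ := p
    by_cases hv : v = 0 <;> cases iz <;> simp [azFwd, hv, ih]

theorem azBwd_length (l : List (Nat × Int)) (d : List Int) (iz : Option Nat) :
    (azBwd l d iz).length = d.length := by
  induction l generalizing d iz with
  | nil => rfl
  | cons p rest ih =>
    obtain ⟨i, v⟩ := p
    by_cases hv : v = 0 <;> cases iz <;> simp [azBwd, hv, ih] <;> split <;> simp [ih]

-- ---- facts about bzZeros ----
theorem bzZeros_append (s : Nat) (xs ys : List Int) :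
    bzZeros s (xs ++ ys) = bzZeros s xs ++ bzZeros (s + xs.length) ys := by
  induction xs generalizing s with
  | nil => simp [bzZeros]
  | cons v rest ih =>
    by_cases hv : v = 0 <;>
      simp [bzZeros, hv, ih, Nat.add_assoc, Nat.add_comm 1 rest.length]

theorem bzZeros_mem_bounds (s : Nat) (xs : List Int) (t : Nat) (ht : t ∈ bzZeros s xs) :
    s ≤ t ∧ t < s + xs.length := by
  induction xs generalizing s with
  | nil => simp [bzZeros] at ht
  | cons v rest ih =>
    simp only [List.length_cons]
    by_cases hv : v = 0 <;> simp [bzZeros, hv] at ht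
    · rcases ht with h | h
      · omega
      · have := ih (s + 1) h; omega
    · have := ih (s + 1) ht; omega

theorem bzZeros_sorted (s : Nat) (xs : List Int) : (bzZeros s xs).Pairwise (· < ·) := by
  induction xs generalizing s with
  | nil => simp [bzZeros]
  | cons v rest ih =>
    by_cases hv : v = 0 <;> simp [bzZeros, hv]
    · exact ⟨fun t ht => (bzZeros_mem_bounds _ _ _ ht).1, ih (s + 1)⟩
    · exact ih (s + 1)

theorem lzF_cons (iz : Option Nat) (i : Nat) (v : Int) (l : List (Nat × Int)) :
    lzF iz ((i, v) :: l) = lzF (if v = 0 then some i else iz) l := by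
  by_cases hv : v = 0 <;> simp [lzF, hv]

theorem or_getLast_cons {α : Type} (a : α) (T : List α) (iz : Option α) :
    ((a :: T).getLast?).or iz = (T.getLast?).or (some a) := by
  cases h : T.getLast? with
  | none =>
    have : T = [] := List.getLast?_eq_none_iff.mp h
    subst this; simp
  | some b =>
    have : (a :: T).getLast? = some b := by
      cases T with
      | nil => simp at h
      | cons c T' => rw [List.getLast?_cons_cons]; exact h
    simp [this, h]

theorem lzF_pvEnum (iz : Option Nat) (s : Nat) (u : List Int) :
    lzF iz (pvEnum s u) = ((bzZeros s u).getLast?).or iz := by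
  induction u generalizing s iz with
  | nil => simp [lzF, pvEnum, bzZeros]
  | cons v rest ih =>
    rw [pvEnum, lzF_cons]
    by_cases hv : v = 0
    · simp only [hv, bzZeros, if_pos]
      rw [ih, or_getLast_cons]
    · simp only [bzZeros, hv, ite_false]
      exact ih _ _

theorem lzF_append (iz : Option Nat) (l1 l2 : List (Nat × Int)) :
    lzF iz (l1 ++ l2) = lzF (lzF iz l1) l2 := by
  simp [lzF, List.foldl_append]

theorem lzF_pvEnum_reverse (iz : Option Nat) (s : Nat) (u : List Int) :
    lzF iz ((pvEnum s u).reverse) = ((bzZeros s u).head?).or iz := by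
  induction u generalizing s iz with
  | nil => simp [lzF, pvEnum, bzZeros]
  | cons v rest ih =>
    rw [pvEnum, List.reverse_cons, lzF_append, ih]
    by_cases hv : v = 0
    · simp [lzF, bzZeros, hv]
    · simp [lzF, bzZeros, hv]

theorem azFwd_spec (length : Int) (xs : List Int) (s : Nat) (d : List Int) (iz : Option Nat)
    (hlen : s + xs.length ≤ d.length) (j : Nat) :
    (azFwd length (pvEnum s xs) d iz)[j]? =
      if s ≤ j ∧ j < s + xs.length ∧ xs.getD (j - s) 0 ≠ 0 then
        some (match lzF iz (pvEnum s (xs.take (j - s))) with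
              | some z => (j : Int) - (z : Int)
              | none => length)
      else d[j]? := by
  induction xs generalizing s d iz with
  | nil =>
    rw [pvEnum, show azFwd length [] d iz = d from rfl,
      if_neg (by rintro ⟨h1, h2, h3⟩; simp only [List.length_nil] at h2; omega)]
  | cons v rest ih =>
    have hsd : s < d.length := by simp only [List.length_cons] at hlen; omega
    rw [pvEnum]
    simp only [azFwd]
    by_cases hv : v = 0
    · rw [if_pos hv]
      rw [ih (s + 1) d (some s) (by simp only [List.length_cons] at hlen; omega)]
      by_cases hR : s + 1 ≤ j ∧ j < s + 1 + rest.length ∧ rest.getD (j - (s + 1)) 0 ≠ 0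
      · have hjs : j - s = (j - (s + 1)) + 1 := by omega
        have hout : s ≤ j ∧ j < s + (v :: rest).length ∧ (v :: rest).getD (j - s) 0 ≠ 0 := by
          refine ⟨by omega, by simp only [List.length_cons]; omega, ?_⟩
          rw [hjs, List.getD_cons_succ]
          exact hR.2.2
        rw [if_pos hR, if_pos hout, hjs, List.take_succ_cons, pvEnum, lzF_cons, if_pos hv]
      · have hout : ¬(s ≤ j ∧ j < s + (v :: rest).length ∧ (v :: rest).getD (j - s) 0 ≠ 0) := by
          rintro ⟨h1, h2, h3⟩
          rcases Nat.eq_or_lt_of_le h1 with he | hlt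
          · apply h3
            rw [← he, Nat.sub_self, List.getD_cons_zero, hv]
          · apply hR
            have hjs : j - s = (j - (s + 1)) + 1 := by omega
            rw [hjs, List.getD_cons_succ] at h3
            exact ⟨by omega, by simp only [List.length_cons] at h2; omega, h3⟩
        rw [if_neg hR, if_neg hout]
    · rw [if_neg hv]
      have step : ∀ val : Int,
          (azFwd length (pvEnum (s + 1) rest) (d.set s val) iz)[j]? =
            if s + 1 ≤ j ∧ j < s + 1 + rest.length ∧ rest.getD (j - (s + 1)) 0 ≠ 0 then
              some (match lzF iz (pvEnum (s + 1) (rest.take (j - (s + 1)))) with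
                    | some z => (j : Int) - (z : Int)
                    | none => length)
            else (d.set s val)[j]? := by
        intro val
        rw [ih (s + 1) (d.set s val) iz
          (by simp only [List.length_set]; simp only [List.length_cons] at hlen; omega)]
      by_cases hj : j = s
      · subst hj
        have hIH : ¬(j + 1 ≤ j ∧ j < j + 1 + rest.length ∧ rest.getD (j - (j + 1)) 0 ≠ 0) := by
          rintro ⟨h1, _⟩; omega
        have hout : j ≤ j ∧ j < j + (v :: rest).length ∧ (v :: rest).getD (j - j) 0 ≠ 0 := by
          refine ⟨le_refl j, by simp only [List.length_cons]; omega, ?_⟩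
          rw [Nat.sub_self, List.getD_cons_zero]
          exact hv
        cases iz with
        | none =>
          rw [step length, if_neg hIH, List.getElem?_set_self hsd, if_pos hout,
            Nat.sub_self, List.take_zero, pvEnum]
          rfl
        | some z =>
          rw [step ((j : Int) - (z : Int)), if_neg hIH, List.getElem?_set_self hsd, if_pos hout,
            Nat.sub_self, List.take_zero, pvEnum]
          rfl
      · have hset : ∀ val : Int, (d.set s val)[j]? = d[j]? := fun val =>
          List.getElem?_set_ne (fun h => hj h.symm)
        have hiter :
            (match iz with
              | some z => azFwd length (pvEnum (s + 1) rest) (d.set s ((s : Int) - (z : Int))) iz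
              | none => azFwd length (pvEnum (s + 1) rest) (d.set s length) iz)[j]? =
            if s + 1 ≤ j ∧ j < s + 1 + rest.length ∧ rest.getD (j - (s + 1)) 0 ≠ 0 then
              some (match lzF iz (pvEnum (s + 1) (rest.take (j - (s + 1)))) with
                    | some z => (j : Int) - (z : Int)
                    | none => length)
            else d[j]? := by
          cases iz with
          | none => rw [step length]; split <;> [rfl; exact hset length]
          | some z => rw [step ((s : Int) - (z : Int))]; split <;> [rfl; exact hset _]
        rw [hiter]
        by_cases hR : s + 1 ≤ j ∧ j < s + 1 + rest.length ∧ rest.getD (j - (s + 1)) 0 ≠ 0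
        · have hjs : j - s = (j - (s + 1)) + 1 := by omega
          have hout : s ≤ j ∧ j < s + (v :: rest).length ∧ (v :: rest).getD (j - s) 0 ≠ 0 := by
            refine ⟨by omega, by simp only [List.length_cons]; omega, ?_⟩
            rw [hjs, List.getD_cons_succ]
            exact hR.2.2
          rw [if_pos hR, if_pos hout, hjs, List.take_succ_cons, pvEnum, lzF_cons, if_neg hv]
        · have hout : ¬(s ≤ j ∧ j < s + (v :: rest).length ∧ (v :: rest).getD (j - s) 0 ≠ 0) := by
            rintro ⟨h1, h2, h3⟩
            rcases Nat.eq_or_lt_of_le h1 with he | hlt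
            · exact hj he.symm
            · apply hR
              have hjs : j - s = (j - (s + 1)) + 1 := by omega
              rw [hjs, List.getD_cons_succ] at h3
              exact ⟨by omega, by simp only [List.length_cons] at h2; omega, h3⟩
          rw [if_neg hR, if_neg hout]

theorem azBwd_spec (xs : List Int) (s j : Nat) :
    ∀ (d : List Int) (iz : Option Nat), s + xs.length ≤ d.length →
    (azBwd ((pvEnum s xs).reverse) d iz)[j]? =
      if s ≤ j ∧ j < s + xs.length ∧ xs.getD (j - s) 0 ≠ 0 then
        some (match lzF iz ((pvEnum (j + 1) (xs.drop (j + 1 - s))).reverse) with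
              | some z => if d.getD j 0 > (z : Int) - (j : Int) then (z : Int) - (j : Int) else d.getD j 0
              | none => d.getD j 0)
      else d[j]? := by
  induction xs using List.reverseRecOn with
  | nil =>
    intro d iz hlen
    rw [pvEnum, List.reverse_nil, show azBwd [] d iz = d from rfl,
      if_neg (by rintro ⟨h1, h2, h3⟩; simp only [List.length_nil] at h2; omega)]
  | append_singleton u v ih =>
    intro d iz hlen
    have hul : (u ++ [v]).length = u.length + 1 := by simp
    have hi : s + u.length < d.length := by rw [hul] at hlen; omega
    have hgl : ∀ t, t < u.length → (u ++ [v]).getD t 0 = u.getD t 0 := by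
      intro t ht
      rw [List.getD_eq_getElem?_getD, List.getD_eq_getElem?_getD, List.getElem?_append_left ht]
    have hglast : (u ++ [v]).getD u.length 0 = v := by
      rw [List.getD_eq_getElem?_getD, List.getElem?_append_right (le_refl _), Nat.sub_self]
      rfl
    have hvmatch : ∀ (hj : s ≤ j) (hjlt : j < s + u.length),
        (pvEnum (j + 1) ((u ++ [v]).drop (j + 1 - s))).reverse
          = (s + u.length, v) :: (pvEnum (j + 1) (u.drop (j + 1 - s))).reverse := by
      intro hj hjlt
      rw [List.drop_append_of_le_length (by omega), pvEnum_append, List.length_drop,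
        show j + 1 + (u.length - (j + 1 - s)) = s + u.length from by omega,
        show pvEnum (s + u.length) [v] = [(s + u.length, v)] from rfl]
      simp
    have key : ∀ (d' : List Int) (iz' : Option Nat), d'.length = d.length →
        (∀ t, t < s + u.length → d'.getD t 0 = d.getD t 0) →
        (azBwd ((pvEnum s u).reverse) d' iz')[j]? =
          if s ≤ j ∧ j < s + u.length ∧ u.getD (j - s) 0 ≠ 0 then
            some (match lzF iz' ((pvEnum (j + 1) (u.drop (j + 1 - s))).reverse) with
                  | some z => if d.getD j 0 > (z : Int) - (j : Int) then (z : Int) - (j : Int) else d.getD j 0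
                  | none => d.getD j 0)
          else d'[j]? := by
      intro d' iz' hl hg
      rw [ih d' iz' (by omega)]
      by_cases hR : s ≤ j ∧ j < s + u.length ∧ u.getD (j - s) 0 ≠ 0
      · rw [if_pos hR, if_pos hR, hg j hR.2.1]
      · rw [if_neg hR, if_neg hR]
    have houtpos : ∀ (hR : s ≤ j ∧ j < s + u.length ∧ u.getD (j - s) 0 ≠ 0),
        s ≤ j ∧ j < s + (u ++ [v]).length ∧ (u ++ [v]).getD (j - s) 0 ≠ 0 := by
      rintro ⟨h1, h2, h3⟩
      refine ⟨h1, by rw [hul]; omega, ?_⟩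
      rw [hgl (j - s) (by omega)]
      exact h3
    have houtneg : ∀ (hje : j ≠ s + u.length)
        (hR : ¬(s ≤ j ∧ j < s + u.length ∧ u.getD (j - s) 0 ≠ 0)),
        ¬(s ≤ j ∧ j < s + (u ++ [v]).length ∧ (u ++ [v]).getD (j - s) 0 ≠ 0) := by
      rintro hje hR ⟨h1, h2, h3⟩
      rw [hul] at h2
      apply hR
      refine ⟨h1, by omega, ?_⟩
      rw [← hgl (j - s) (by omega)]
      exact h3
    rw [pvEnum_append s u [v], show pvEnum (s + u.length) [v] = [(s + u.length, v)] from rfl,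
      List.reverse_append, List.reverse_cons, List.reverse_nil, List.nil_append,
      List.singleton_append]
    simp only [azBwd]
    by_cases hv : v = 0
    · rw [if_pos hv, key d (some (s + u.length)) rfl (fun t ht => rfl)]
      by_cases hR : s ≤ j ∧ j < s + u.length ∧ u.getD (j - s) 0 ≠ 0
      · rw [if_pos hR, if_pos (houtpos hR), hvmatch hR.1 hR.2.1, lzF_cons, if_pos hv]
      · have hout : ¬(s ≤ j ∧ j < s + (u ++ [v]).length ∧ (u ++ [v]).getD (j - s) 0 ≠ 0) := by
          by_cases hje : j = s + u.length
          · rintro ⟨h1, h2, h3⟩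
            apply h3
            rw [hje, show s + u.length - s = u.length from by omega, hglast, hv]
          · exact houtneg hje hR
        rw [if_neg hR, if_neg hout]
    · rw [if_neg hv]
      have hjeq_out : j = s + u.length →
          (s ≤ j ∧ j < s + (u ++ [v]).length ∧ (u ++ [v]).getD (j - s) 0 ≠ 0) := by
        intro hje
        refine ⟨by omega, by rw [hul]; omega, ?_⟩
        rw [hje, show s + u.length - s = u.length from by omega, hglast]
        exact hv
      have hdropnil : (u ++ [v]).drop (s + u.length + 1 - s) = [] :=
        List.drop_eq_nil_of_le (by rw [hul]; omega)
      have hIHneg : ¬(s ≤ s + u.length ∧ s + u.length < s + u.length ∧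
          u.getD (s + u.length - s) 0 ≠ 0) := by
        rintro ⟨_, h2, _⟩; omega
      cases iz with
      | none =>
        simp only []
        rw [key d none rfl (fun t ht => rfl)]
        by_cases hje : j = s + u.length
        · subst hje
          rw [if_neg hIHneg, if_pos (hjeq_out rfl), hdropnil,
            show pvEnum (s + u.length + 1) ([] : List Int) = [] from rfl, List.reverse_nil]
          simp only [lzF, List.foldl_nil]
          rw [List.getElem?_eq_getElem hi, List.getD_eq_getElem d 0 hi]
        · by_cases hR : s ≤ j ∧ j < s + u.length ∧ u.getD (j - s) 0 ≠ 0
          · rw [if_pos hR, if_pos (houtpos hR), hvmatch hR.1 hR.2.1, lzF_cons, if_neg hv]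
          · rw [if_neg hR, if_neg (houtneg hje hR)]
      | some z =>
        simp only []
        by_cases hc : d.getD (s + u.length) 0 > (z : Int) - ((s + u.length : Nat) : Int)
        · rw [if_pos hc,
            key (d.set (s + u.length) ((z : Int) - ((s + u.length : Nat) : Int))) (some z)
              (by simp)
              (fun t ht => by
                rw [List.getD_eq_getElem?_getD, List.getD_eq_getElem?_getD,
                  List.getElem?_set_ne (by omega)])]
          by_cases hje : j = s + u.length
          · subst hje
            rw [if_neg hIHneg, if_pos (hjeq_out rfl), hdropnil,
              show pvEnum (s + u.length + 1) ([] : List Int) = [] from rfl, List.reverse_nil]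
            simp only [lzF, List.foldl_nil]
            rw [List.getElem?_set_self hi, if_pos hc]
          · by_cases hR : s ≤ j ∧ j < s + u.length ∧ u.getD (j - s) 0 ≠ 0
            · rw [if_pos hR, if_pos (houtpos hR), hvmatch hR.1 hR.2.1, lzF_cons, if_neg hv]
            · rw [if_neg hR, if_neg (houtneg hje hR),
                List.getElem?_set_ne (fun h => hje h.symm)]
        · rw [if_neg hc, key d (some z) rfl (fun t ht => rfl)]
          by_cases hje : j = s + u.length
          · subst hje
            rw [if_neg hIHneg, if_pos (hjeq_out rfl), hdropnil,
              show pvEnum (s + u.length + 1) ([] : List Int) = [] from rfl, List.reverse_nil]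
            simp only [lzF, List.foldl_nil]
            rw [if_neg hc, List.getElem?_eq_getElem hi, List.getD_eq_getElem d 0 hi]
          · by_cases hR : s ≤ j ∧ j < s + u.length ∧ u.getD (j - s) 0 ≠ 0
            · rw [if_pos hR, if_pos (houtpos hR), hvmatch hR.1 hR.2.1, lzF_cons, if_neg hv]
            · rw [if_neg hR, if_neg (houtneg hje hR)]

-- ---- generic sorted-list / countP facts ----
theorem countP_eq_zero_of_ge (T : List Nat) (i a : Nat) (hi : i ≤ a)
    (hT : ∀ t ∈ T, a < t) : T.countP (fun z => decide (z < i)) = 0 := by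
  rw [List.countP_eq_zero]
  intro t ht
  simp only [decide_eq_true_eq]
  have := hT t ht
  omega

theorem sorted_countP_lt (Z : List Nat) (hs : Z.Pairwise (· < ·)) (i m : Nat)
    (hm : m < Z.countP (fun z => decide (z < i))) : Z.getD m 0 < i := by
  induction Z generalizing m with
  | nil => simp at hm
  | cons a T ih =>
    rw [List.pairwise_cons] at hs
    by_cases ha : a < i
    · rw [List.countP_cons] at hm
      simp only [decide_eq_true_eq, ha, if_pos] at hm
      cases m with
      | zero => simpa using ha
      | succ m =>
        rw [List.getD_cons_succ]
        exact ih hs.2 m (by omega)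
    · rw [List.countP_cons] at hm
      simp only [decide_eq_true_eq, ha, ite_false] at hm
      rw [countP_eq_zero_of_ge T i a (by omega) hs.1] at hm
      omega

theorem le_countP_of_below (Z : List Nat) (i k : Nat) (hk : k ≤ Z.length)
    (hb : ∀ m, m < k → Z.getD m 0 < i) : k ≤ Z.countP (fun z => decide (z < i)) := by
  have h1 : (Z.take k).countP (fun z => decide (z < i)) = (Z.take k).length := by
    rw [List.countP_eq_length]
    intro a ha
    rw [List.mem_iff_getElem] at ha
    obtain ⟨m, hm, rfl⟩ := ha
    have hmk : m < k := by
      have := List.length_take_le k Z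
      omega
    have : (Z.take k)[m] = Z.getD m 0 := by
      rw [List.getElem_take, List.getD_eq_getElem]
    simp only [this, decide_eq_true_eq]
    exact hb m hmk
  have h2 : (Z.take k).length = k := by simp; omega
  calc k = (Z.take k).countP (fun z => decide (z < i)) := by rw [h1, h2]
    _ ≤ Z.countP (fun z => decide (z < i)) := (List.take_sublist k Z).countP_le

theorem bzAdvance_eq (Z : List Nat) (hs : Z.Pairwise (· < ·)) (i k : Nat)
    (hk : k ≤ Z.length) (hbelow : ∀ m, m < k → Z.getD m 0 < i) :
    bzAdvance Z i k = Z.countP (fun z => decide (z < i)) := by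
  have H : ∀ n k, Z.length - k ≤ n → k ≤ Z.length → (∀ m, m < k → Z.getD m 0 < i) →
      bzAdvance Z i k = Z.countP (fun z => decide (z < i)) := by
    intro n
    induction n with
    | zero =>
      intro k hn hk hb
      have hkl : k = Z.length := by omega
      rw [bzAdvance, dif_neg (by omega)]
      have := List.countP_le_length (l := Z) (p := fun z => decide (z < i))
      have := le_countP_of_below Z i k hk hb
      omega
    | succ n ih =>
      intro k hn hk hb
      rw [bzAdvance]
      by_cases h1 : k < Z.length
      · rw [dif_pos h1]
        by_cases h2 : Z.getD k 0 < i
        · rw [if_pos h2]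
          exact ih (k + 1) (by omega) (by omega)
            (fun m hm => by rcases Nat.lt_or_ge m k with h | h; exact hb m h
                            have : m = k := by omega
                            subst this; exact h2)
        · rw [if_neg h2]
          have hle := le_countP_of_below Z i k hk hb
          by_cases h3 : k < Z.countP (fun z => decide (z < i))
          · exact absurd (sorted_countP_lt Z hs i k h3) h2
          · omega
      · rw [dif_neg h1]
        have := List.countP_le_length (l := Z) (p := fun z => decide (z < i))
        have := le_countP_of_below Z i k hk hb
        omega
  exact H Z.length k (by omega) hk hbelow

theorem bzGo_spec (length : Int) (Z : List Nat) (hs : Z.Pairwise (· < ·))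
    (xs : List Int) (s k : Nat) (hk : k ≤ Z.length)
    (hbelow : ∀ m, m < k → Z.getD m 0 < s) :
    bzGo length Z (pvEnum s xs) k =
      (pvEnum s xs).map (fun p => if p.2 = 0 then 0 else bVal length Z p.1) := by
  induction xs generalizing s k with
  | nil => simp [pvEnum, bzGo]
  | cons v rest ih =>
    rw [pvEnum, bzGo, List.map_cons]
    by_cases hv : v = 0
    · rw [if_pos hv]
      simp only [hv, ite_true]
      rw [ih (s + 1) k hk (fun m hm => by have := hbelow m hm; omega)]
    · rw [if_neg hv]
      have hadv := bzAdvance_eq Z hs s k hk hbelow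
      simp only [hadv]
      congr 1
      · simp [bVal, hv]
      · exact ih (s + 1) _ (List.countP_le_length)
          (fun m hm => by have := sorted_countP_lt Z hs s m hm; omega)

-- countP splits at position j: all of bzZeros 0 (take j) is < j, none of bzZeros j (drop j)
theorem countP_split (xs : List Int) (j : Nat) (hj : j ≤ xs.length) :
    (bzZeros 0 xs).countP (fun z => decide (z < j)) = (bzZeros 0 (xs.take j)).length := by
  conv_lhs => rw [← List.take_append_drop j xs]
  rw [bzZeros_append, List.countP_append]
  have h1 : (bzZeros 0 (xs.take j)).countP (fun z => decide (z < j)) = (bzZeros 0 (xs.take j)).length := by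
    rw [List.countP_eq_length]
    intro t ht
    have := bzZeros_mem_bounds 0 (xs.take j) t ht
    simp only [List.length_take] at this
    simp only [decide_eq_true_eq]
    omega
  have h2 : (bzZeros (0 + (xs.take j).length) (xs.drop j)).countP (fun z => decide (z < j)) = 0 := by
    rw [List.countP_eq_zero]
    intro t ht
    have := bzZeros_mem_bounds _ _ t ht
    simp only [List.length_take] at this
    simp only [decide_eq_true_eq]
    omega
  rw [h1, h2]
  omega

theorem main_pointwise (length : Int) (xs : List Int) (j : Nat) :
    (get_nearest_zero length xs)[j]? = (get_nearest_zero_alt length xs)[j]? := by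
  have hsort := bzZeros_sorted 0 xs
  rw [get_nearest_zero, get_nearest_zero_alt,
    bzGo_spec length (bzZeros 0 xs) hsort xs 0 0 (Nat.zero_le _)
      (fun m hm => absurd hm (Nat.not_lt_zero m))]
  have hd1len : (azFwd length (pvEnum 0 xs) (List.replicate xs.length 0) none).length = xs.length := by
    rw [azFwd_length, List.length_replicate]
  by_cases hj : j < xs.length
  case neg =>
    rw [List.getElem?_eq_none (by rw [azBwd_length, hd1len]; omega),
      List.getElem?_eq_none (by rw [List.length_map, pvEnum_length]; omega)]
  case pos =>
    rw [List.getElem?_map, pvEnum_getElem?, List.getElem?_eq_getElem hj]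
    simp only [Option.map_some, Nat.zero_add]
    rw [azBwd_spec xs 0 j _ none (by rw [hd1len]; omega)]
    by_cases hz : xs[j] = 0
    · rw [if_neg (by
        rintro ⟨_, _, h3⟩
        apply h3
        rw [Nat.sub_zero, List.getD_eq_getElem _ _ hj, hz])]
      rw [azFwd_spec length xs 0 _ none (by rw [List.length_replicate]; omega) j,
        if_neg (by
          rintro ⟨_, _, h3⟩
          apply h3
          rw [Nat.sub_zero, List.getD_eq_getElem _ _ hj, hz])]
      rw [List.getElem?_eq_getElem (by rw [List.length_replicate]; exact hj),
        List.getElem_replicate]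
      simp [hz]
    · have hcond : 0 ≤ j ∧ j < 0 + xs.length ∧ xs.getD (j - 0) 0 ≠ 0 :=
        ⟨Nat.zero_le j, by omega, by rw [Nat.sub_zero, List.getD_eq_getElem _ _ hj]; exact hz⟩
      rw [if_pos hcond]
      simp only [hz, ite_false]
      have hfwd := azFwd_spec length xs 0 (List.replicate xs.length 0) none
        (by rw [List.length_replicate]; omega) j
      rw [if_pos hcond] at hfwd
      have hgetD : (azFwd length (pvEnum 0 xs) (List.replicate xs.length 0) none).getD j 0 =
          (match lzF none (pvEnum 0 (xs.take (j - 0))) with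
            | some z => (j : Int) - (z : Int)
            | none => length) := by
        rw [List.getD_eq_getElem?_getD, hfwd]
        rfl
      rw [hgetD, Nat.sub_zero, lzF_pvEnum, Option.or_none, Nat.sub_zero,
        lzF_pvEnum_reverse, Option.or_none]
      -- split the zero list at position j
      have hPS : bzZeros 0 xs = bzZeros 0 (xs.take j) ++ bzZeros (j + 1) (xs.drop (j + 1)) := by
        conv_lhs => rw [← List.take_append_drop j xs]
        rw [bzZeros_append]
        congr 1
        rw [show 0 + (xs.take j).length = j from by
          rw [List.length_take, Nat.min_eq_left (le_of_lt hj)]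
          omega]
        rw [List.drop_eq_getElem_cons hj, bzZeros, if_neg hz]
      have hc : (bzZeros 0 xs).countP (fun z => decide (z < j)) =
          (bzZeros 0 (xs.take j)).length := countP_split xs j (le_of_lt hj)
      simp only [bVal]
      rw [hc, hPS]
      have hmin : ∀ a b : Int, (if a > b then b else a) = min a b := by
        intro a b
        rw [min_def]
        split_ifs <;> omega
      cases hP : (bzZeros 0 (List.take j xs)).getLast? with
      | none =>
        have hPnil := List.getLast?_eq_none_iff.mp hP
        rw [hPnil]
        cases hS : (bzZeros (j + 1) (List.drop (j + 1) xs)).head? with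
        | none =>
          have hSnil := List.head?_eq_none_iff.mp hS
          rw [hSnil]
          simp
        | some w =>
          have hSd : (bzZeros (j + 1) (List.drop (j + 1) xs)).getD 0 0 = w := by
            rw [List.getD_eq_getElem?_getD, ← List.head?_eq_getElem?, hS]
            rfl
          have hSpos : 0 < (bzZeros (j + 1) (List.drop (j + 1) xs)).length := by
            cases hl : bzZeros (j + 1) (List.drop (j + 1) xs) with
            | nil => rw [hl] at hS; simp at hS
            | cons a T => simp
          simp only [List.nil_append, List.length_nil, ite_true, hSd]
          rw [if_pos hSpos, hmin]
      | some z =>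
        have hPpos : 0 < (bzZeros 0 (List.take j xs)).length := by
          cases hl : bzZeros 0 (List.take j xs) with
          | nil => rw [hl] at hP; simp at hP
          | cons a T => simp
        have hz1 : (bzZeros 0 (List.take j xs) ++ bzZeros (j + 1) (List.drop (j + 1) xs)).getD
            ((bzZeros 0 (List.take j xs)).length - 1) 0 = z := by
          rw [List.getD_eq_getElem?_getD, List.getElem?_append_left (by omega),
            ← List.getLast?_eq_getElem?, hP]
          rfl
        simp only [hz1]
        rw [if_neg (by omega : ¬ (bzZeros 0 (List.take j xs)).length = 0)]
        cases hS : (bzZeros (j + 1) (List.drop (j + 1) xs)).head? with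
        | none =>
          have hSnil := List.head?_eq_none_iff.mp hS
          rw [hSnil]
          simp
        | some w =>
          have hSd : (bzZeros 0 (List.take j xs) ++ bzZeros (j + 1) (List.drop (j + 1) xs)).getD
              (bzZeros 0 (List.take j xs)).length 0 = w := by
            rw [List.getD_eq_getElem?_getD, List.getElem?_append_right (le_refl _), Nat.sub_self,
              ← List.head?_eq_getElem?, hS]
            rfl
          have hSpos : 0 < (bzZeros (j + 1) (List.drop (j + 1) xs)).length := by
            cases hl : bzZeros (j + 1) (List.drop (j + 1) xs) with
            | nil => rw [hl] at hS; simp at hS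
            | cons a T => simp
          have hlt : (bzZeros 0 (List.take j xs)).length <
              (bzZeros 0 (List.take j xs) ++ bzZeros (j + 1) (List.drop (j + 1) xs)).length := by
            rw [List.length_append]; omega
          simp only [hSd]
          rw [if_pos hlt, hmin]

-- ===== VERDICT (by name: the statement is the Claim_ definition above) =====
theorem get_nearest_zero_spec : Claim_equal_get_nearest_zero := by
  intro length xs _
  show _ = _
  exact List.ext_getElem? (fun j => main_pointwise length xs j)
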